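-- pv_equiv track=rewrite | github.com/zedzijc/advent2021 | solutions/day6/day6_solution.py | _run_cuttlefish_model
-- ===== SOURCE A (Python) =====
-- def _run_cuttlefish_model(cuttlefish, respawn_time, days):
-- 	cuttlefish_distribution = _determine_initial_cuttlefish_distribution(cuttlefish, respawn_time)
--
-- 	day = 0
-- 	while day < days:
-- 		cuttlefish_distribution = _process_cuttlefish_day(cuttlefish_distribution, respawn_time)
-- 		day += 1
--
-- 	cuttlefish_total = 0
-- 	for cuttlefish_group in cuttlefish_distribution:
-- 		cuttlefish_total += cuttlefish_group
-- 	return cuttlefish_total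
--
-- def _process_cuttlefish_day(cuttlefish_distribution, respawn_time):
-- 	new_distribution = _get_empty_cuttlefish_distribution(respawn_time)
-- 	for index, cuttlefish_group in enumerate(cuttlefish_distribution):
-- 		if index == 0:
-- 			new_distribution[len(new_distribution) -1 ] += cuttlefish_group
-- 			new_distribution[respawn_time -1 ] += cuttlefish_group
-- 		else:
-- 			new_distribution[index - 1] += cuttlefish_group
-- 	return new_distribution
--
-- def _determine_initial_cuttlefish_distribution(cuttlefish, respawn_time):
-- 	cuttlefish_distribution = _get_empty_cuttlefish_distribution(respawn_time)
-- 	for one_cuttlefish in cuttlefish: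
-- 		cuttlefish_distribution[one_cuttlefish] += 1
-- 	return cuttlefish_distribution
--
-- def _get_empty_cuttlefish_distribution(respawn_time):
-- 	return [0 for x in range(respawn_time + 2)]
-- ===== SOURCE B (Python) =====
-- from collections import deque
--
-- def _run_cuttlefish_model(cuttlefish, respawn_time, days):
-- 	timer_counts = deque([0] * (respawn_time + 2))
-- 	for one_cuttlefish in cuttlefish:
-- 		timer_counts[one_cuttlefish] += 1
-- 	for _ in range(days):
-- 		zero_timer_group = timer_counts.popleft()
-- 		timer_counts.append(zero_timer_group)
-- 		timer_counts[respawn_time - 1] += zero_timer_group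
-- 	return sum(timer_counts)
-- ===== Notes on version B (the rewrite author's own statement) =====
-- stated objective: faster
-- what changed: Each day A rebuilds a fresh (respawn_time+2)-array by scanning every timer group; B keeps the counts in a deque and does an O(1) left-rotation (popleft/append) plus one addition at index respawn_time-1 per day, eliminating the per-day rebuild loop.
-- outside the precondition, e.g. on _run_cuttlefish_model([], -2, 1): A returns 0, B raises IndexError
import Mathlib
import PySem

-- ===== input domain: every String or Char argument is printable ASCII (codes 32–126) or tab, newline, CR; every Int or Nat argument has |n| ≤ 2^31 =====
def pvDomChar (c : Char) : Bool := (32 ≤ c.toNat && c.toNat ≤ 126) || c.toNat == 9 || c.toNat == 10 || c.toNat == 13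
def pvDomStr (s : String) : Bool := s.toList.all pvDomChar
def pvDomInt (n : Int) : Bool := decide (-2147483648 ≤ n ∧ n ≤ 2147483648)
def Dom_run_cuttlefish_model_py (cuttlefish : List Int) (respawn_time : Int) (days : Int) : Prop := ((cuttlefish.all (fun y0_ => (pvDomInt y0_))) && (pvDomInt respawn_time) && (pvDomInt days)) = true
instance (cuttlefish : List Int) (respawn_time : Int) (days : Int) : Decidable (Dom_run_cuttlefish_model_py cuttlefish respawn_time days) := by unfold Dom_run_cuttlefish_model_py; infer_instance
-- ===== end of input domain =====

-- B replaces A's per-day rebuild of the whole timer array by a deque-style left rotation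
-- plus one in-place addition per day (objective: faster; equal return value on Pre_).

-- ===== PORT A =====
-- _get_empty_cuttlefish_distribution, loop body of _process_cuttlefish_day,
-- _determine_initial_cuttlefish_distribution, _process_cuttlefish_day, the while-loop,
-- then _run_cuttlefish_model (dist[i] via total pyGetD/pySetD; in range under Pre_)

def pvEmptyDist (respawn_time : Int) : List Int :=
  (PySem.List.pyRange 0 (respawn_time + 2) 1).map (fun _ => (0 : Int))

-- loop body of _process_cuttlefish_day
def pvStepA (respawn_time : Int) (nd : List Int) (p : Int × Int) : List Int :=
  if p.1 = 0 then
    let nd1 := PySem.List.pySetD nd ((nd.length : Int) - 1)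
      (PySem.List.pyGetD nd ((nd.length : Int) - 1) 0 + p.2)
    PySem.List.pySetD nd1 (respawn_time - 1)
      (PySem.List.pyGetD nd1 (respawn_time - 1) 0 + p.2)
  else
    PySem.List.pySetD nd (p.1 - 1) (PySem.List.pyGetD nd (p.1 - 1) 0 + p.2)

def pvProcessDay (dist : List Int) (respawn_time : Int) : List Int :=
  (PySem.List.enumerate dist 0).foldl (pvStepA respawn_time) (pvEmptyDist respawn_time)

def pvRotateDay (d : List Int) (respawn_time : Int) : List Int :=
  match d with
  | [] => []
  | n :: rest =>
    let d1 := rest ++ [n]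
    PySem.List.pySetD d1 (respawn_time - 1) (PySem.List.pyGetD d1 (respawn_time - 1) 0 + n)


def pvInitDist (cuttlefish : List Int) (respawn_time : Int) : List Int :=
  cuttlefish.foldl
    (fun dist f => PySem.List.pySetD dist f (PySem.List.pyGetD dist f 0 + 1))
    (pvEmptyDist respawn_time)

def pvDayLoopA (dist : List Int) (respawn_time : Int) (day : Int) (days : Int) : List Int :=
  if day < days then
    pvDayLoopA (pvProcessDay dist respawn_time) respawn_time (day + 1) days
  else dist
termination_by (days - day).toNat
decreasing_by omega

def run_cuttlefish_model_py (cuttlefish : List Int) (respawn_time : Int) (days : Int) : Int :=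
  (pvDayLoopA (pvInitDist cuttlefish respawn_time) respawn_time 0 days).foldl
    (fun total g => total + g) 0

-- ===== PORT B =====
-- deque([0]*(respawn_time+2)), the counting loop, then for each day one rotation
-- (popleft/append = move head to back) plus one addition at index respawn_time-1, then sum

def run_cuttlefish_model_py_alt (cuttlefish : List Int) (respawn_time : Int) (days : Int) : Int :=
  ((PySem.List.pyRange 0 days 1).foldl (fun d _ => pvRotateDay d respawn_time)
    (cuttlefish.foldl
      (fun d f => PySem.List.pySetD d f (PySem.List.pyGetD d f 0 + 1))
      (List.replicate (respawn_time + 2).toNat 0))).sum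

-- ===== PRECONDITION & SPEC =====
-- Pre_ excludes exactly the inputs where indexing raises IndexError in A (an initial timer
-- outside [-(respawn_time+2), respawn_time+2)) or in A's day loop (days > 0 with
-- respawn_time < 0); in the sub-case cuttlefish = [] with respawn_time <= -2 and days > 0,
-- A returns 0 by looping over a zero-length distribution while B's popleft raises IndexError.
def Pre_run_cuttlefish_model_py (cuttlefish : List Int) (respawn_time : Int) (days : Int) : Prop :=
  (∀ f ∈ cuttlefish, -(respawn_time + 2) ≤ f ∧ f < respawn_time + 2) ∧ (0 < days → 0 ≤ respawn_time)
instance (cuttlefish : List Int) (respawn_time : Int) (days : Int) : Decidable (Pre_run_cuttlefish_model_py cuttlefish respawn_time days) := by unfold Pre_run_cuttlefish_model_py; infer_instance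

def pvWitness_run_cuttlefish_model_py : List Int × Int × Int := ([1, 2, 3, 1], 6, 18)

def Spec_run_cuttlefish_model_py (cuttlefish : List Int) (respawn_time : Int) (days : Int) (out : Int) : Prop := out = run_cuttlefish_model_py_alt cuttlefish respawn_time days
instance (cuttlefish : List Int) (respawn_time : Int) (days : Int) (out : Int) : Decidable (Spec_run_cuttlefish_model_py cuttlefish respawn_time days out) := by unfold Spec_run_cuttlefish_model_py; infer_instance

-- ===== CLAIM (what is proved, stated in full; the proofs are below) =====
def Claim_equal_run_cuttlefish_model_py : Prop := ∀ (cuttlefish : List Int) (respawn_time : Int) (days : Int), Dom_run_cuttlefish_model_py cuttlefish respawn_time days → Pre_run_cuttlefish_model_py cuttlefish respawn_time days → Spec_run_cuttlefish_model_py cuttlefish respawn_time days (run_cuttlefish_model_py cuttlefish respawn_time days)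

-- ===== LEMMAS AND PROOFS =====

theorem pvEmptyDist_eq (r : Int) : pvEmptyDist r = List.replicate (r + 2).toNat 0 := by
  rw [pvEmptyDist, PySem.List.pyRange_one]
  simp [Function.comp_def]

theorem take_set_of_le (l : List Int) (n m : Nat) (a : Int) (h : m ≤ n) :
    (l.set n a).take m = l.take m := by
  rw [List.take_set]
  exact List.set_eq_of_length_le (by simp; omega)

theorem zip_add_repl_set (n j : Nat) (x : Int) (ys : List Int) (hy : ys.length = n) (hj : j < n) :
    List.zipWith (· + ·) ((List.replicate n 0).set j x) ys
      = ys.set j (x + ys[j]'(by omega)) := by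
  apply List.ext_getElem
  · simp [hy]
  · intro i h1 h2
    simp only [List.getElem_zipWith, List.getElem_set, List.getElem_replicate]
    by_cases hij : j = i
    · subst hij; simp
    · simp [hij]

theorem tailfold (r : Int) :
    ∀ (gs : List Int) (k : Nat) (s : List Int), k + gs.length ≤ s.length →
    (PySem.List.enumerate gs ((k : Int) + 1)).foldl (pvStepA r) s
    = s.take k ++ (List.zipWith (· + ·) ((s.drop k).take gs.length) gs) ++ s.drop (k + gs.length) := by
  intro gs
  induction gs with
  | nil => intro k s h; simp [PySem.List.enumerate_nil]
  | cons g gs ih =>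
    intro k s h
    have hk : k < s.length := by simp at h; omega
    rw [PySem.List.enumerate_cons, List.foldl_cons]
    have hne : ((k : Int) + 1) ≠ 0 := by omega
    have hstep : pvStepA r s ((k : Int) + 1, g) = s.set k (s[k]'hk + g) := by
      rw [pvStepA]
      simp only [hne, if_false]
      have e1 : ((k : Int) + 1 - 1) = ((k : Nat) : Int) := by ring
      rw [e1, PySem.List.pySetD_natCast, PySem.List.pyGetD_natCast, List.getD_eq_getElem _ _ hk]
    rw [hstep]
    have e2 : ((k : Int) + 1 + 1) = (((k+1 : Nat)) : Int) + 1 := by push_cast; ring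
    rw [e2, ih (k+1) _ (by simp at h ⊢; omega)]
    have hdrop : (s.set k (s[k]'hk + g)).drop (k+1) = s.drop (k+1) := by
      rw [List.drop_set]; simp
    have htake : (s.set k (s[k]'hk + g)).take (k+1) = s.take k ++ [s[k]'hk + g] := by
      rw [List.take_add_one, take_set_of_le _ _ _ _ (le_refl k)]
      simp [List.getElem?_set_self hk]
    have hdrop2 : (s.set k (s[k]'hk + g)).drop (k + 1 + gs.length) = s.drop (k + (g :: gs).length) := by
      rw [show k + (g :: gs).length = k + 1 + gs.length by simp; omega, List.drop_set]
      simp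
      intro h2; exact absurd h2 (by omega)
    have hcons : (s.drop k).take ((g :: gs).length) = s[k]'hk :: (s.drop (k+1)).take gs.length := by
      rw [List.drop_eq_getElem_cons hk, List.length_cons, List.take_succ_cons]
    rw [hdrop, htake, hdrop2, hcons]
    simp [List.zipWith]

theorem pvProcessDay_eq_rotate (dist : List Int) (r : Int) (hr : 0 ≤ r)
    (hlen : dist.length = (r + 2).toNat) :
    pvProcessDay dist r = pvRotateDay dist r := by
  obtain ⟨g0, gs, rfl⟩ : ∃ g0 gs, dist = g0 :: gs := by
    cases dist with
    | nil => exfalso; simp at hlen; omega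
    | cons a l => exact ⟨a, l, rfl⟩
  rcases eq_or_lt_of_le hr with hr0 | hr1
  · -- r = 0, dist = [g0, g1]
    obtain rfl : r = 0 := hr0.symm
    obtain ⟨g1, rfl⟩ : ∃ g1, gs = [g1] := by
      cases gs with
      | nil => exfalso; simp at hlen
      | cons b t =>
        cases t with
        | nil => exact ⟨b, rfl⟩
        | cons c u => exfalso; simp at hlen
    have hz : pvEmptyDist 0 = [0, 0] := by decide
    rw [pvProcessDay, pvRotateDay, hz]
    simp [pvStepA, PySem.List.enumerate_cons, PySem.List.enumerate_nil,
      PySem.List.pySetD, PySem.List.pySet?, PySem.List.pyGetD, PySem.List.pyGet?,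
      PySem.List.pyIdx?]
  · -- 1 ≤ r
    have hN3 : 3 ≤ (r + 2).toNat := by omega
    set N := (r + 2).toNat with hN
    have hgs : gs.length = N - 1 := by simp at hlen; omega
    set j := (r - 1).toNat with hj
    have hjgs : j < gs.length := by omega
    have hrj : r - 1 = (j : Int) := by omega
    rw [pvProcessDay, PySem.List.enumerate_cons, List.foldl_cons, pvEmptyDist_eq]
    set s2 := ((List.replicate N (0:Int)).set (N-1) g0).set j g0 with hs2
    have hhead : pvStepA r (List.replicate N (0:Int)) (0, g0) = s2 := by
      rw [pvStepA]
      have hlz : ((List.replicate N (0:Int)).length : Int) - 1 = ((N - 1 : Nat) : Int) := by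
        simp; omega
      rw [hlz, PySem.List.pySetD_natCast, PySem.List.pyGetD_natCast,
        List.getD_eq_getElem _ _ (by simp; omega), List.getElem_replicate]
      rw [hrj, PySem.List.pySetD_natCast, PySem.List.pyGetD_natCast,
        List.getD_eq_getElem _ _ (by simp; omega)]
      have hget : ((List.replicate N (0:Int)).set (N-1) (0 + g0))[j]'(by simp; omega) = 0 := by
        rw [List.getElem_set]
        simp [show ¬ (N - 1 = j) by omega]
      rw [hget]
      simp
      exact hs2.symm
    rw [hhead]
    have e0 : (0 : Int) + 1 = ((0 : Nat) : Int) + 1 := by norm_num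
    rw [e0, tailfold r gs 0 s2 (by simp [hs2, hgs])]
    simp only [List.take_zero, List.drop_zero, List.nil_append, Nat.zero_add]
    have htk : s2.take gs.length = (List.replicate (N-1) 0).set j g0 := by
      rw [hs2, List.take_set, take_set_of_le _ _ _ _ (by omega), List.take_replicate,
        show min gs.length N = N - 1 from by omega]
    have hdr : s2.drop gs.length = [g0] := by
      rw [hs2, List.drop_set, if_pos hjgs, List.drop_set,
        if_neg (by omega : ¬ N - 1 < gs.length), List.drop_replicate,
        show N - gs.length = 1 from by omega, show N - 1 - gs.length = 0 from by omega]
      rfl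
    rw [htk, hdr, zip_add_repl_set (N-1) j g0 gs (by omega) (by omega)]
    -- B side
    rw [pvRotateDay]
    rw [hrj, PySem.List.pySetD_natCast, PySem.List.pyGetD_natCast,
      List.getD_eq_getElem _ _ (by simp; omega),
      List.getElem_append_left hjgs,
      List.set_append_left _ _ (by omega)]
    congr 1
    congr 1
    ring

theorem foldl_len {α : Type} (step : List Int → α → List Int)
    (h : ∀ s a, (step s a).length = s.length) :
    ∀ (l : List α) (s : List Int), (l.foldl step s).length = s.length := by
  intro l
  induction l with
  | nil => intro s; rfl
  | cons x xs ih => intro s; simp only [List.foldl_cons]; rw [ih, h]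

theorem pvEmptyDist_length (r : Int) : (pvEmptyDist r).length = (r + 2).toNat := by
  rw [pvEmptyDist_eq]; simp

theorem pvRotateDay_length (d : List Int) (r : Int) :
    (pvRotateDay d r).length = d.length := by
  cases d with
  | nil => rfl
  | cons n rest => simp [pvRotateDay, PySem.List.length_pySetD]

theorem pvInitDist_length (c : List Int) (r : Int) :
    (pvInitDist c r).length = (r + 2).toNat := by
  rw [pvInitDist, foldl_len _ (by intro s a; simp [PySem.List.length_pySetD]), pvEmptyDist_length]

theorem pvDayLoopA_eq_fold (r : Int) : ∀ (n : Nat) (day days : Int) (dist : List Int),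
    (days - day).toNat = n →
    pvDayLoopA dist r day days
      = (PySem.List.pyRange day days 1).foldl (fun d _ => pvProcessDay d r) dist := by
  intro n
  induction n with
  | zero =>
    intro day days dist h
    rw [pvDayLoopA, if_neg (by omega), PySem.List.pyRange_one_eq_nil (by omega)]
    rfl
  | succ n ih =>
    intro day days dist h
    have hlt : day < days := by omega
    rw [pvDayLoopA, if_pos hlt, PySem.List.pyRange_one_cons hlt, List.foldl_cons]
    exact ih (day + 1) days _ (by omega)

theorem fold_process_eq_fold_rotate (r : Int) (hr : 0 ≤ r) :
    ∀ (l : List Int) (dist : List Int), dist.length = (r + 2).toNat →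
    l.foldl (fun d _ => pvProcessDay d r) dist = l.foldl (fun d _ => pvRotateDay d r) dist := by
  intro l
  induction l with
  | nil => intro dist _; rfl
  | cons x xs ih =>
    intro dist hlen
    simp only [List.foldl_cons]
    rw [pvProcessDay_eq_rotate dist r hr hlen]
    exact ih _ (by rw [pvRotateDay_length, hlen])

-- ===== VERDICT (by name: the statement is the Claim_ definition above) =====
theorem run_cuttlefish_model_py_spec : Claim_equal_run_cuttlefish_model_py := by
  intro c r d _ hpre
  unfold Spec_run_cuttlefish_model_py run_cuttlefish_model_py run_cuttlefish_model_py_alt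
  have hinit : pvInitDist c r
      = c.foldl (fun dd f => PySem.List.pySetD dd f (PySem.List.pyGetD dd f 0 + 1))
        (List.replicate (r + 2).toNat 0) := by
    rw [pvInitDist, pvEmptyDist_eq]
  rw [pvDayLoopA_eq_fold r (d - 0).toNat 0 d _ rfl]
  by_cases hd : 0 < d
  · rw [fold_process_eq_fold_rotate r (hpre.2 hd) _ _ (pvInitDist_length c r), hinit,
      List.sum_eq_foldl]
  · rw [PySem.List.pyRange_one_eq_nil (by omega)]
    simp only [List.foldl_nil]
    rw [hinit, List.sum_eq_foldl]
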